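-- pv_equiv track=rewrite | github.com/im-yifanluo/long-document-qa-baseline | official_methods.py | _quality_gutenberg_parser
-- ===== SOURCE A (Python) =====
-- from typing import Any, Dict, List, Optional, Sequence, Tuple
--
-- def _quality_gutenberg_parser(raw_article: str) -> str:
--     """Match the helper used in the official ReadAgent demo notebook."""
--     lines: List[str] = []
--     previous_line: Optional[str] = None
--     for raw_line in raw_article.split("\n"):
--         line = raw_line.strip()
--         original_line = line
--         if line == "":
--             if previous_line == "":
--                 line = "\n"
--             else:
--                 previous_line = original_line
--                 continue
--         previous_line = original_line
--         lines.append(line)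
--     return " ".join(lines)
-- ===== SOURCE B (Python) =====
-- def _quality_gutenberg_parser(raw_article: str) -> str:
--     """Index-arithmetic rewrite: find the positions of the non-blank lines and
--     derive every '\n' token count from index gaps (a gap of g blank lines
--     between two non-blank lines yields g-1 tokens)."""
--     stripped = [line.strip() for line in raw_article.split("\n")]
--     n = len(stripped)
--     nonblank = [(i, line) for i, line in enumerate(stripped) if line != ""]
--     if not nonblank:
--         return " ".join(["\n"] * (n - 1))
--     (first, line0), rest = nonblank[0], nonblank[1:]
--     tokens = ["\n"] * (first - 1) + [line0]
--     prev = first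
--     for i, line in rest:
--         tokens += ["\n"] * (i - prev - 2) + [line]
--         prev = i
--     tokens += ["\n"] * (n - prev - 2)
--     return " ".join(tokens)
-- ===== Notes on version B (the rewrite author's own statement) =====
-- stated objective: alternative
-- what changed: Replaced A's previous_line/continue state machine with index arithmetic: collect the (index, line) pairs of the non-blank stripped lines and compute every newline-token count from index gaps (a gap of g blank lines yields g-1 tokens), with closed formulas for leading, trailing and all-blank runs.
import Mathlib
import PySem

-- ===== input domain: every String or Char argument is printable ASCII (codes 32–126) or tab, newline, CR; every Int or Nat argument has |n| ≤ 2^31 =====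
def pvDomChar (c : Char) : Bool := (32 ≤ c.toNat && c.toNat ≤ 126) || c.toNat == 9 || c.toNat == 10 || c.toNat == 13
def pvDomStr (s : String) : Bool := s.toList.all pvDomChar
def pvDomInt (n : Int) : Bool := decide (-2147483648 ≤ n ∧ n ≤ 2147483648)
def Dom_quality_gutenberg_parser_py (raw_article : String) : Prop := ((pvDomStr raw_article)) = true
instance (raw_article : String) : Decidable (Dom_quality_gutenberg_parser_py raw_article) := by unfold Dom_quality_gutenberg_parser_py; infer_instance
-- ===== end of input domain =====

-- B replaces A's previous_line/continue state machine by index arithmetic: it collects the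
-- (index, line) pairs of the non-blank lines and computes every newline-token count from index
-- gaps; objective: alternative decomposition, same cost.
-- Both ports work on List Char (PySem.Chars) and convert back with String.ofList at the end.

-- ===== PORT A =====
-- loop body of A's for-loop: state = (lines so far, previous_line)
def pvStepA (st : List (List Char) × Option (List Char)) (raw_line : List Char) :
    List (List Char) × Option (List Char) :=
  let line := PySem.Chars.strip raw_line
  let original_line := line
  if line == [] then
    if st.2 == some [] then (st.1 ++ [['\n']], some original_line)
    else (st.1, some original_line)                 -- the 'continue' branch: previous_line updated, nothing appended
  else (st.1 ++ [line], some original_line)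

def quality_gutenberg_parser_py (raw_article : String) : String :=
  let st := (PySem.Chars.splitOn raw_article.toList ['\n']).foldl pvStepA ([], none)
  String.ofList (PySem.Chars.join [' '] st.1)

-- ===== PORT B =====
-- Source B's for-loop over the non-blank pairs: state = (tokens so far, prev index)
def pvStepB (st : List (List Char) × Int) (p : Int × List Char) : List (List Char) × Int :=
  (st.1 ++ List.replicate (p.1 - st.2 - 2).toNat ['\n'] ++ [p.2], p.1)

def quality_gutenberg_parser_py_alt (raw_article : String) : String :=
  let stripped := (PySem.Chars.splitOn raw_article.toList ['\n']).map PySem.Chars.strip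
  let n : Int := stripped.length
  let nonblank := (PySem.List.enumerate stripped).filter (fun p => !(p.2 == []))
  match nonblank with
  | [] => String.ofList (PySem.Chars.join [' '] (List.replicate (n - 1).toNat ['\n']))
  | (first, line0) :: rest =>
      let st := rest.foldl pvStepB (List.replicate (first - 1).toNat ['\n'] ++ [line0], first)
      String.ofList (PySem.Chars.join [' '] (st.1 ++ List.replicate (n - st.2 - 2).toNat ['\n']))

-- ===== PRECONDITION & SPEC =====
def Spec_quality_gutenberg_parser_py (raw_article : String) (out : String) : Prop := out = quality_gutenberg_parser_py_alt raw_article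
instance (raw_article : String) (out : String) : Decidable (Spec_quality_gutenberg_parser_py raw_article out) := by unfold Spec_quality_gutenberg_parser_py; infer_instance

-- ===== CLAIM (what is proved, stated in full; the proofs are below) =====
def Claim_equal_quality_gutenberg_parser_py : Prop := ∀ (raw_article : String), Dom_quality_gutenberg_parser_py raw_article → Spec_quality_gutenberg_parser_py raw_article (quality_gutenberg_parser_py raw_article)

-- ===== LEMMAS AND PROOFS =====

-- A's loop, expressed as a state machine on the stripped lines: b = (previous_line == "")
def pvTokA (b : Bool) : List (List Char) → List (List Char)
  | [] => []
  | l :: rest =>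
    if l == [] then (if b then ['\n'] :: pvTokA true rest else pvTokA true rest)
    else l :: pvTokA false rest

theorem pvFoldA (ls : List (List Char)) : ∀ (acc : List (List Char)) (prev : Option (List Char)),
    (ls.foldl pvStepA (acc, prev)).1 = acc ++ pvTokA (prev == some []) (ls.map PySem.Chars.strip) := by
  induction ls with
  | nil => intro acc prev; simp [pvTokA]
  | cons h t ih =>
    intro acc prev
    simp only [List.foldl_cons, List.map_cons, pvStepA, pvTokA]
    by_cases hb : PySem.Chars.strip h == []
    · by_cases hp : prev == some []
      · simp [hb, hp, ih, List.append_assoc]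
      · simp [hb, hp, ih]
    · simp [hb, ih, List.append_assoc]

-- the non-blank (index, line) pairs of ls, indices starting at o
def pvNbFrom (o : Int) : List (List Char) → List (Int × List Char)
  | [] => []
  | l :: rest => if l == [] then pvNbFrom (o+1) rest else (o, l) :: pvNbFrom (o+1) rest

theorem pvEnumFilter (ls : List (List Char)) : ∀ (o : Int),
    (PySem.List.enumerate ls o).filter (fun p => !(p.2 == [])) = pvNbFrom o ls := by
  induction ls with
  | nil => intro o; simp [pvNbFrom, PySem.List.enumerate_nil]
  | cons l rest ih =>
    intro o
    rw [PySem.List.enumerate_cons, List.filter_cons, ih]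
    by_cases hb : l = [] <;> simp [pvNbFrom, hb]

-- the tokens contributed after a non-blank line at index prev (pairs ps, total line count n)
def pvT (prev : Int) (ps : List (Int × List Char)) (n : Int) : List (List Char) :=
  match ps with
  | [] => List.replicate (n - prev - 2).toNat ['\n']
  | (i, l) :: rest => List.replicate (i - prev - 2).toNat ['\n'] ++ (l :: pvT i rest n)

-- the tokens contributed from offset o when in "previous line blank" state
def pvU (o : Int) (ps : List (Int × List Char)) (n : Int) : List (List Char) :=
  match ps with
  | [] => List.replicate (n - o).toNat ['\n']
  | (i, l) :: rest => List.replicate (i - o).toNat ['\n'] ++ (l :: pvT i rest n)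

theorem pvT_n (prev : Int) (ps : List (Int × List Char)) {n n' : Int} (h : n = n') :
    pvT prev ps n = pvT prev ps n' := by rw [h]

theorem pvU_n (o : Int) (ps : List (Int × List Char)) {n n' : Int} (h : n = n') :
    pvU o ps n = pvU o ps n' := by rw [h]

theorem pvT_eq_U (n : Int) (ps : List (Int × List Char)) (prev : Int) :
    pvT prev ps n = pvU (prev + 2) ps n := by
  cases ps with
  | nil => simp only [pvT, pvU, show n - prev - 2 = n - (prev + 2) from by ring]
  | cons p rest =>
    obtain ⟨i, l⟩ := p
    simp only [pvT, pvU, show i - prev - 2 = i - (prev + 2) from by ring]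

theorem pvNbFrom_ge (ls : List (List Char)) : ∀ (o : Int) (p : Int × List Char),
    p ∈ pvNbFrom o ls → o ≤ p.1 := by
  induction ls with
  | nil => intro o p h; simp [pvNbFrom] at h
  | cons l rest ih =>
    intro o p h
    by_cases hb : l = []
    · rw [pvNbFrom, if_pos (by simp [hb])] at h
      have := ih (o+1) p h; omega
    · rw [pvNbFrom, if_neg (by simp [hb])] at h
      rcases List.mem_cons.mp h with h | h
      · subst h; simp
      · have := ih (o+1) p h; omega

theorem pvUShift (o n : Int) (ps : List (Int × List Char))
    (h : ∀ p ∈ ps, o + 1 ≤ p.1) (hn : o + 1 ≤ n) :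
    pvU o ps n = ['\n'] :: pvU (o+1) ps n := by
  cases ps with
  | nil =>
    have hc : (n - o).toNat = (n - (o+1)).toNat + 1 := by omega
    simp [pvU, hc, List.replicate_succ]
  | cons p rest =>
    obtain ⟨i, l⟩ := p
    have hi : o + 1 ≤ i := h (i, l) (by simp)
    have hc : (i - o).toNat = (i - (o+1)).toNat + 1 := by omega
    simp [pvU, hc, List.replicate_succ]

-- joint induction: A's token stream from any offset, in both states
theorem pvK (ls : List (List Char)) : ∀ (o : Int),
    pvTokA true ls = pvU o (pvNbFrom o ls) (o + ls.length)
    ∧ pvTokA false ls = pvT o (pvNbFrom (o+1) ls) (o + 1 + ls.length) := by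
  induction ls with
  | nil =>
    intro o
    refine ⟨?_, ?_⟩
    · simp only [pvNbFrom, pvU, pvTokA, List.length_nil, Nat.cast_zero, add_zero, sub_self,
        Int.toNat_zero, List.replicate_zero]
    · simp only [pvNbFrom, pvT, pvTokA, List.length_nil, Nat.cast_zero, add_zero]
      rw [show (o + 1 - o - 2).toNat = 0 from by omega]
      simp
  | cons l rest ih =>
    intro o
    refine ⟨?_, ?_⟩
    · by_cases hb : l = []
      · calc pvTokA true (l :: rest) = ['\n'] :: pvTokA true rest := by simp [pvTokA, hb]
          _ = ['\n'] :: pvU (o+1) (pvNbFrom (o+1) rest) ((o+1) + rest.length) := by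
                rw [(ih (o+1)).1]
          _ = pvU o (pvNbFrom (o+1) rest) ((o+1) + rest.length) :=
                (pvUShift o _ _ (fun p hp => pvNbFrom_ge rest (o+1) p hp) (by omega)).symm
          _ = pvU o (pvNbFrom o (l :: rest)) (o + (l :: rest).length) := by
                rw [pvNbFrom, if_pos (by simp [hb])]
                exact pvU_n _ _ (by push_cast [List.length_cons]; ring)
      · calc pvTokA true (l :: rest) = l :: pvTokA false rest := by simp [pvTokA, hb]
          _ = l :: pvT o (pvNbFrom (o+1) rest) (o + 1 + rest.length) := by rw [(ih o).2]
          _ = pvU o (pvNbFrom o (l :: rest)) (o + (l :: rest).length) := by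
                rw [pvNbFrom, if_neg (by simp [hb])]
                simp only [pvU]
                rw [show (o - o).toNat = 0 from by omega]
                simp only [List.replicate_zero, List.nil_append]
                exact congrArg _ (pvT_n _ _ (by push_cast [List.length_cons]; ring))
    · by_cases hb : l = []
      · calc pvTokA false (l :: rest) = pvTokA true rest := by simp [pvTokA, hb]
          _ = pvU (o+2) (pvNbFrom (o+2) rest) ((o+2) + rest.length) := (ih (o+2)).1
          _ = pvT o (pvNbFrom (o+1) (l :: rest)) (o + 1 + (l :: rest).length) := by
                rw [pvT_eq_U, pvNbFrom, if_pos (by simp [hb]),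
                    show o + 1 + 1 = o + 2 from by ring]
                exact pvU_n _ _ (by push_cast [List.length_cons]; ring)
      · calc pvTokA false (l :: rest) = l :: pvTokA false rest := by simp [pvTokA, hb]
          _ = l :: pvT (o+1) (pvNbFrom (o+2) rest) (o + 2 + rest.length) := by
                rw [(ih (o+1)).2, show o + 1 + 1 = o + 2 from by ring]
          _ = pvT o (pvNbFrom (o+1) (l :: rest)) (o + 1 + (l :: rest).length) := by
                rw [pvNbFrom, if_neg (by simp [hb]),
                    show o + 1 + 1 = o + 2 from by ring]
                simp only [pvT]
                rw [show (o + 1 - o - 2).toNat = 0 from by omega]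
                simp only [List.replicate_zero, List.nil_append]
                exact congrArg _ (pvT_n _ _ (by push_cast [List.length_cons]; ring))

-- B's loop unrolled: the fold plus the trailing replicate equals init ++ pvT prev ps n
theorem pvFoldB (n : Int) (ps : List (Int × List Char)) : ∀ (init : List (List Char)) (prev : Int),
    (ps.foldl pvStepB (init, prev)).1
      ++ List.replicate (n - (ps.foldl pvStepB (init, prev)).2 - 2).toNat ['\n']
    = init ++ pvT prev ps n := by
  induction ps with
  | nil => intro init prev; simp [pvT]
  | cons p rest ih =>
    intro init prev
    obtain ⟨i, l⟩ := p
    simp only [List.foldl_cons, pvStepB, pvT]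
    rw [ih]
    simp [List.append_assoc]

-- ===== VERDICT (by name: the statement is the Claim_ definition above) =====
theorem quality_gutenberg_parser_py_spec : Claim_equal_quality_gutenberg_parser_py := by
  intro raw_article _
  unfold Spec_quality_gutenberg_parser_py
  simp only [quality_gutenberg_parser_py, quality_gutenberg_parser_py_alt]
  rw [pvFoldA, pvEnumFilter]
  set ls := (PySem.Chars.splitOn raw_article.toList ['\n']).map PySem.Chars.strip with hls
  rw [show ((none : Option (List Char)) == some []) = false from rfl]
  simp only [List.nil_append]
  cases hcase : pvNbFrom 0 ls with
  | nil =>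
    dsimp only
    cases hls2 : ls with
    | nil => simp [pvTokA]
    | cons l rest =>
      rw [hls2] at hcase
      by_cases hb : l = []
      · rw [show pvTokA false (l :: rest) = pvTokA true rest from by simp [pvTokA, hb],
            (pvK rest 1).1]
        rw [pvNbFrom, if_pos (by simp [hb])] at hcase
        norm_num at hcase
        rw [hcase]
        simp only [pvU]
        congr 3
        push_cast [List.length_cons]; omega
      · rw [pvNbFrom, if_neg (by simp [hb])] at hcase
        exact absurd hcase (by simp)
  | cons p ps =>
    obtain ⟨first, line0⟩ := p
    dsimp only
    rw [pvFoldB]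
    cases hls2 : ls with
    | nil => rw [hls2] at hcase; simp [pvNbFrom] at hcase
    | cons l rest =>
      rw [hls2] at hcase
      by_cases hb : l = []
      · rw [show pvTokA false (l :: rest) = pvTokA true rest from by simp [pvTokA, hb],
            (pvK rest 1).1]
        rw [pvNbFrom, if_pos (by simp [hb])] at hcase
        norm_num at hcase
        rw [hcase]
        simp only [pvU]
        rw [pvT_n first ps (show (1:Int) + (rest.length : Int) = ((l :: rest).length : Int)
              from by push_cast [List.length_cons]; ring)]
        simp [List.append_assoc]
      · rw [pvNbFrom, if_neg (by simp [hb])] at hcase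
        injection hcase with hc1 hc2
        injection hc1 with hf hl0
        subst hf
        subst hl0
        subst hc2
        rw [show pvTokA false (l :: rest) = l :: pvTokA false rest from by simp [pvTokA, hb],
            (pvK rest 0).2]
        rw [pvT_n 0 (pvNbFrom (0+1) rest) (show (0:Int) + 1 + (rest.length : Int) = ((l :: rest).length : Int)
              from by push_cast [List.length_cons]; ring)]
        rw [show ((0:Int) - 1).toNat = 0 from by omega]
        simp
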